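-- pv_equiv track=rewrite | github.com/wanawin/pythonfiltertester | filter_checker_footer.py | _structure_of
-- ===== SOURCE A (Python) =====
-- from collections import Counter
--
-- def _structure_of(digs):
--     counts = Counter(digs).most_common()
--     mults = sorted([c for _, c in counts], reverse=True)
--     key = "-".join(map(str, mults))
--     return {
--         "5": "QUINT", "4-1": "QUAD", "3-2": "TRIPLE-DOUBLE", "3-1-1": "TRIPLE",
--         "2-2-1": "DOUBLE-DOUBLE", "2-1-1-1": "DOUBLE", "1-1-1-1-1": "SINGLE",
--     }.get(key, key)
-- ===== SOURCE B (Python) =====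
-- def _structure_of(digs):
--     # sort, then run-length scan of consecutive equal elements (no Counter)
--     s = sorted(digs)
--     runs = []
--     i = 0
--     n = len(s)
--     while i < n:
--         j = i
--         while j < n and s[j] == s[i]:
--             j += 1
--         runs.append(j - i)
--         i = j
--     runs.sort(reverse=True)
--     key = "-".join(map(str, runs))
--     return {
--         "5": "QUINT", "4-1": "QUAD", "3-2": "TRIPLE-DOUBLE", "3-1-1": "TRIPLE",
--         "2-2-1": "DOUBLE-DOUBLE", "2-1-1-1": "DOUBLE", "1-1-1-1-1": "SINGLE",
--     }.get(key, key)
-- ===== Notes on version B (the rewrite author's own statement) =====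
-- stated objective: alternative
-- what changed: Replaces hash-based counting (Counter + most_common) by sorting the digits and run-length-scanning consecutive equal runs; run lengths sorted descending give the same key.
import Mathlib
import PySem

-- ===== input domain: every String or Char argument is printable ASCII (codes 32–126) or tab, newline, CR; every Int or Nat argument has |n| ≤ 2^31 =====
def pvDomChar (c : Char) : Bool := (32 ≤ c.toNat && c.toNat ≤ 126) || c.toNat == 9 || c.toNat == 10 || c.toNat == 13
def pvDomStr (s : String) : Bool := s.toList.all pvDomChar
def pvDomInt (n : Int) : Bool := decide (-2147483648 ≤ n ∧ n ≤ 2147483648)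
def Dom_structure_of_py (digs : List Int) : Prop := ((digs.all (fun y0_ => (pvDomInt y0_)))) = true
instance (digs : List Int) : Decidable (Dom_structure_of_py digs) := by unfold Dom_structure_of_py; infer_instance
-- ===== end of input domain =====

-- B replaces Counter-based counting with a sort + run-length scan; alternative algorithm of the same cost.

-- ===== PORT A =====
-- the label table shared by both Pythons, as a literal dict
def pvLabels : PySem.Dict String String :=
  PySem.Dict.ofList [("5", "QUINT"), ("4-1", "QUAD"), ("3-2", "TRIPLE-DOUBLE"), ("3-1-1", "TRIPLE"),
    ("2-2-1", "DOUBLE-DOUBLE"), ("2-1-1-1", "DOUBLE"), ("1-1-1-1-1", "SINGLE")]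

def structure_of_py (digs : List Int) : String :=
  -- counts = Counter(digs).most_common()  (sorted by count, descending)
  let counts := PySem.List.sorted (PySem.Dict.counter digs).items (fun p => p.2) true
  -- mults = sorted([c for _, c in counts], reverse=True)
  let mults := PySem.List.sorted (counts.map (fun p => p.2)) (fun c => c) true
  let key := PySem.Str.join "-" (mults.map PySem.Int.toStr)
  pvLabels.getD key key

-- ===== PORT B =====
-- the inner 'while j < n and s[j] == s[i]' advance is the takeWhile/dropWhile split of the current run
def pvRunLengths : List Int → List Int
  | [] => []
  | x :: xs =>
    (((xs.takeWhile (· == x)).length : Int) + 1) :: pvRunLengths (xs.dropWhile (· == x))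
  termination_by l => l.length
  decreasing_by
    simp only [List.length_cons]
    exact Nat.lt_succ_of_le (List.length_dropWhile_le _ _)

def structure_of_py_alt (digs : List Int) : String :=
  let s := PySem.List.sorted digs (fun x => x) false
  let runs := pvRunLengths s
  let runsSorted := PySem.List.sorted runs (fun x => x) true
  let key := PySem.Str.join "-" (runsSorted.map PySem.Int.toStr)
  pvLabels.getD key key

-- ===== PRECONDITION & SPEC =====
def Spec_structure_of_py (digs : List Int) (out : String) : Prop := out = structure_of_py_alt digs
instance (digs : List Int) (out : String) : Decidable (Spec_structure_of_py digs out) := by unfold Spec_structure_of_py; infer_instance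

-- ===== CLAIM (what is proved, stated in full; the proofs are below) =====
def Claim_equal_structure_of_py : Prop := ∀ (digs : List Int), Dom_structure_of_py digs → Spec_structure_of_py digs (structure_of_py digs)

-- ===== LEMMAS AND PROOFS =====

-- descending sort (reverse=True, identity key) is determined by the multiset
theorem pv_sortedRev_congr {xs ys : List Int} (h : xs.Perm ys) :
    PySem.List.sorted xs (fun x => x) true = PySem.List.sorted ys (fun x => x) true := by
  apply PySem.List.eq_of_perm_of_pairwise_le_of_injective (key := fun x : Int => -x) neg_injective
  · exact ((PySem.List.sorted_perm xs _ true).trans h).trans (PySem.List.sorted_perm ys _ true).symm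
  · exact (PySem.List.sorted_pairwise_rev xs _).imp (fun h => by omega)
  · exact (PySem.List.sorted_pairwise_rev ys _).imp (fun h => by omega)

-- pushing one fresh element under the Set.ofList fold
theorem pv_foldl_add_cons (d : List Int) (x : Int) (hx : x ∉ d) :
    ∀ s : List Int, List.foldl PySem.Set.add (x :: s) d = x :: List.foldl PySem.Set.add s d := by
  induction d with
  | nil => intro s; rfl
  | cons z d ih =>
    intro s
    have hzx : z ≠ x := by intro h; exact hx (h ▸ List.mem_cons_self)
    have hstep : PySem.Set.add (x :: s) z =
        x :: PySem.Set.add s z := by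
      simp [PySem.Set.add, PySem.Set.contains, hzx]
      split_ifs <;> simp
    rw [List.foldl_cons, List.foldl_cons, hstep,
        ih (fun h => hx (List.mem_cons_of_mem _ h))]

-- adding copies of an already-present element is a no-op
theorem pv_foldl_add_const (t : List Int) (x : Int) (ht : ∀ y ∈ t, y = x) :
    List.foldl PySem.Set.add [x] t = [x] := by
  induction t with
  | nil => rfl
  | cons z t ih =>
    have hz : z = x := ht z List.mem_cons_self
    have hstep : PySem.Set.add [x] z = [x] := by
      simp [PySem.Set.add, PySem.Set.contains, hz]
    rw [List.foldl_cons, hstep, ih (fun y hy => ht y (List.mem_cons_of_mem _ hy))]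

-- every element of the dropped suffix of a sorted list is strictly above the head
theorem pv_dropWhile_gt (x : Int) (xs : List Int)
    (hle : ∀ y ∈ xs, x ≤ y) (hp : xs.Pairwise (· ≤ ·)) :
    ∀ y ∈ xs.dropWhile (· == x), x < y := by
  intro y hy
  have hsub : (xs.dropWhile (· == x)).Sublist xs := List.dropWhile_sublist _
  cases hd : xs.dropWhile (· == x) with
  | nil => simp [hd] at hy
  | cons z d =>
    have hzne : ¬ (z == x) = true := by
      have := List.head?_dropWhile_not (· == x) xs
      rw [hd] at this; simpa using this
    have hz : x < z := by
      have hzmem : z ∈ xs := hsub.mem (hd ▸ List.mem_cons_self)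
      have := hle z hzmem
      simp at hzne; omega
    rw [hd] at hy hsub
    rcases List.mem_cons.mp hy with rfl | hy'
    · exact hz
    · have hpz : z ≤ y := by
        have := hp.sublist hsub
        exact (List.pairwise_cons.mp this).1 y hy'
      omega

-- run lengths of a sorted list are the counts of its distinct values, in dedup order
theorem pv_runLengths_eq (l : List Int) (hp : l.Pairwise (· ≤ ·)) :
    pvRunLengths l = (PySem.List.dedup l).map (fun k => (l.count k : Int)) := by
  induction l using pvRunLengths.induct with
  | case1 => simp [pvRunLengths, PySem.List.dedup, PySem.Set.ofList]
  | case2 x xs ih =>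
    have hle : ∀ y ∈ xs, x ≤ y := (List.pairwise_cons.mp hp).1
    have hpxs : xs.Pairwise (· ≤ ·) := (List.pairwise_cons.mp hp).2
    set t := xs.takeWhile (· == x) with ht
    set d := xs.dropWhile (· == x) with hdd
    have hteq : ∀ y ∈ t, y = x := by
      intro y hy
      have := List.mem_takeWhile_imp hy
      simpa using this
    have hdgt : ∀ y ∈ d, x < y := pv_dropWhile_gt x xs hle hpxs
    have hxd : x ∉ d := fun h => absurd (hdgt x h) (lt_irrefl x)
    have hsplit : xs = t ++ d := (List.takeWhile_append_dropWhile).symm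
    have hpd : d.Pairwise (· ≤ ·) := hpxs.sublist (List.dropWhile_sublist _)
    -- dedup (x :: xs) = x :: dedup d
    have hdedup : PySem.List.dedup (x :: xs) = x :: PySem.List.dedup d := by
      show PySem.List.dedup (x :: xs) = x :: PySem.List.dedup d
      rw [PySem.List.dedup_eq_ofList, PySem.List.dedup_eq_ofList, PySem.Set.ofList_eq_foldl,
          PySem.Set.ofList_eq_foldl, hsplit]
      have h0 : PySem.Set.add ([] : List Int) x = [x] := by
        simp [PySem.Set.add, PySem.Set.contains]
      rw [List.foldl_cons, h0, List.foldl_append, pv_foldl_add_const t x hteq]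
      exact pv_foldl_add_cons d x hxd []
    -- count x (x :: xs) = t.length + 1
    have hcountx : (x :: xs).count x = t.length + 1 := by
      have hct : t.count x = t.length := by
        rw [List.count_eq_length]
        intro y hy; exact (hteq y hy) ▸ rfl
      have hcd : d.count x = 0 := List.count_eq_zero.mpr hxd
      rw [hsplit]
      simp [List.count_append, hct, hcd]
    -- counts of tail keys agree with counts in d
    have hcountd : ∀ k ∈ PySem.List.dedup d, (x :: xs).count k = d.count k := by
      intro k hk
      have hkd : k ∈ d := (PySem.List.mem_dedup d k).mp hk
      have hkx : k ≠ x := fun h => absurd (hdgt k hkd) (by omega)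
      have hct : t.count k = 0 := List.count_eq_zero.mpr (fun h => hkx (hteq k h))
      rw [hsplit]
      simp [List.count_append, hct, Ne.symm hkx]
    have hmap : List.map (fun k => ((x :: xs).count k : Int)) (PySem.List.dedup d) =
        List.map (fun k => (d.count k : Int)) (PySem.List.dedup d) :=
      List.map_congr_left (fun k hk => by rw [hcountd k hk])
    rw [pvRunLengths, hdedup, List.map_cons, hcountx]
    refine congrArg₂ List.cons ?_ ?_
    · push_cast; ring
    · exact (ih hpd).trans hmap.symm

-- the multiset fed to A's final descending sort equals the one fed to B's
theorem pv_mults_perm (digs : List Int) :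
    ((PySem.List.sorted (PySem.Dict.counter digs).items (fun p => p.2) true).map (fun p => p.2)).Perm
      (pvRunLengths (PySem.List.sorted digs (fun x => x) false)) := by
  have hA : ((PySem.List.sorted (PySem.Dict.counter digs).items (fun p => p.2) true).map
      (fun p => p.2)).Perm ((PySem.Set.ofList digs).map (fun k => (digs.count k : Int))) := by
    have h1 := (PySem.List.sorted_perm (PySem.Dict.counter digs).items (fun p => p.2) true).map
      (fun p : Int × Int => p.2)
    have h2 : (PySem.Dict.counter digs).items.map (fun p : Int × Int => p.2) =
        (PySem.Set.ofList digs).map (fun k => (digs.count k : Int)) := by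
      rw [PySem.Dict.items_counter, List.map_map]; rfl
    exact h1.trans (h2 ▸ List.Perm.refl _)
  have hs : (PySem.List.sorted digs (fun x => x) false).Pairwise (· ≤ ·) := by
    have := PySem.List.sorted_pairwise digs (fun x => x)
    simpa using this
  have hB : pvRunLengths (PySem.List.sorted digs (fun x => x) false) =
      (PySem.List.dedup (PySem.List.sorted digs (fun x => x) false)).map
        (fun k => (digs.count k : Int)) := by
    rw [pv_runLengths_eq _ hs]
    exact List.map_congr_left (fun k _ => by
      rw [(PySem.List.sorted_perm digs (fun x => x) false).count_eq])
  have hperm : (PySem.List.dedup (PySem.List.sorted digs (fun x => x) false)).Perm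
      (PySem.Set.ofList digs) := by
    rw [PySem.List.dedup_eq_ofList]
    refine (List.perm_ext_iff_of_nodup (PySem.Set.nodup_ofList _) (PySem.Set.nodup_ofList _)).mpr ?_
    intro a
    rw [PySem.Set.mem_ofList, PySem.Set.mem_ofList, PySem.List.mem_sorted]
  refine hA.trans ?_
  rw [hB]
  exact (hperm.map _).symm

-- ===== VERDICT (by name: the statement is the Claim_ definition above) =====
theorem structure_of_py_spec : Claim_equal_structure_of_py := by
  intro digs _
  show structure_of_py digs = structure_of_py_alt digs
  simp only [structure_of_py, structure_of_py_alt]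
  rw [pv_sortedRev_congr (pv_mults_perm digs)]
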